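-- pv_equiv track=rewrite | github.com/EdwardGa0/CP | Codeforces/Contests/Educational/105/A.py | transform
-- ===== SOURCE A (Python) =====
-- def transform(s, t):
--     res0 = []
--     res1 = []
--     for i in s:
--         if i == t:
--             res0.append('(')
--             res1.append(')')
--         else:
--             res0.append(')')
--             res1.append('(')
--     return [res0, res1]
-- ===== SOURCE B (Python) =====
-- def transform(s, t):
--     n = len(s)
--     res0 = [')'] * n
--     res1 = ['('] * n
--     if len(t) == 1:
--         i = s.find(t)
--         while i != -1:
--             res0[i] = '('
--             res1[i] = ')'
--             i = s.find(t, i + 1)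
--     return [res0, res1]
-- ===== Notes on version B (the rewrite author's own statement) =====
-- stated objective: alternative
-- what changed: B preallocates the two default rows and patches only the positions of matching characters, located by repeated s.find(t, i+1) substring searches (guarded by len(t)==1), instead of mapping every character of s through the comparison.
import Mathlib
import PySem

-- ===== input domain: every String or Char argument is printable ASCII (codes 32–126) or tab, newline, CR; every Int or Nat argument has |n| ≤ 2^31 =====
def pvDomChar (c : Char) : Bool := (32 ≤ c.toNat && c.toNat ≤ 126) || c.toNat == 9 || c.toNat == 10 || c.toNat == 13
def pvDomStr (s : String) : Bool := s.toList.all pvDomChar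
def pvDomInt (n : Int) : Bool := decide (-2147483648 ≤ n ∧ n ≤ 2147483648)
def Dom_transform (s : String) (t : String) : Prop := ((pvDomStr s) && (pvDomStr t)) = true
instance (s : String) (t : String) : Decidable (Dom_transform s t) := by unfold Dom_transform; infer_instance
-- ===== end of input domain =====

-- B preallocates the default rows and patches only the match positions located by repeated s.find
-- (sparse patching via substring search) instead of mapping every character; return value only.
-- ===== PORT A =====
def transform (s : String) (t : String) : List (List String) :=
  let st := s.toList.foldl
    (fun (r : List String × List String) c =>
      if String.ofList [c] = t then (r.1 ++ ["("], r.2 ++ [")"])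
      else (r.1 ++ [")"], r.2 ++ ["("]))
    ([], [])
  [st.1, st.2]

-- ===== PORT B =====
-- the while loop of Source B: i = current find result; fuel (= n+1 at the call) only makes the
-- recursion structurally total — it never runs out on the values the call site reaches
def patchGo (cs ts : List Char) : Nat → Int → List String → List String → List String × List String
  | 0, _, r0, r1 => (r0, r1)
  | fuel + 1, i, r0, r1 =>
    if i = -1 then (r0, r1)
    else patchGo cs ts fuel (PySem.Chars.findFrom cs ts (i + 1))
           (r0.set i.toNat "(") (r1.set i.toNat ")")

def transform_alt (s : String) (t : String) : List (List String) :=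
  let n := s.toList.length
  let res0 := List.replicate n ")"
  let res1 := List.replicate n "("
  if t.toList.length = 1 then
    let p := patchGo s.toList t.toList (n + 1) (PySem.Chars.find s.toList t.toList) res0 res1
    [p.1, p.2]
  else [res0, res1]

-- ===== PRECONDITION & SPEC =====
def Spec_transform (s : String) (t : String) (out : List (List String)) : Prop := out = transform_alt s t
instance (s : String) (t : String) (out : List (List String)) : Decidable (Spec_transform s t out) := by unfold Spec_transform; infer_instance

-- ===== CLAIM =====
def Claim_equal_transform : Prop := ∀ (s : String) (t : String), Dom_transform s t → Spec_transform s t (transform s t)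

-- ===== LEMMAS AND PROOFS =====
theorem transform_foldl (t : String) (l : List Char) (a b : List String) :
    l.foldl
      (fun (r : List String × List String) c =>
        if String.ofList [c] = t then (r.1 ++ ["("], r.2 ++ [")"])
        else (r.1 ++ [")"], r.2 ++ ["("]))
      (a, b)
    = (a ++ l.map (fun c => if String.ofList [c] = t then "(" else ")"),
       b ++ l.map (fun c => if String.ofList [c] = t then ")" else "(")) := by
  induction l generalizing a b with
  | nil => simp
  | cons c l ih =>
    simp only [List.foldl_cons, List.map_cons]
    by_cases h : String.ofList [c] = t <;> simp [h, ih]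

-- what the patch loop leaves at each index, as a total function of the input
def patched (cs : List Char) (c : Char) (k : Nat) (r : List String) (x : String) : List String :=
  (List.range r.length).map fun j => if k ≤ j ∧ cs[j]? = some c then x else r.getD j x

theorem patched_getElem? (cs : List Char) (c : Char) (k : Nat) (r : List String) (x : String)
    (j : Nat) :
    (patched cs c k r x)[j]? =
      r[j]?.map (fun v => if k ≤ j ∧ cs[j]? = some c then x else v) := by
  unfold patched
  by_cases h : j < r.length
  · rw [List.getElem?_map, List.getElem?_range h, List.getElem?_eq_getElem h]
    simp [List.getD, List.getElem?_eq_getElem h]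
  · rw [List.getElem?_eq_none (by simpa using by omega),
      List.getElem?_eq_none (by omega : r.length ≤ j)]
    rfl

theorem singleton_prefix_drop (cs : List Char) (c : Char) (j : Nat) :
    [c] <+: cs.drop j ↔ cs[j]? = some c := by
  rw [← List.head?_drop]
  cases h : cs.drop j with
  | nil => simp
  | cons a l =>
    simp only [List.head?_cons]
    constructor
    · rintro ⟨u, hu⟩; simp only [List.cons_append] at hu; injection hu with h1 _; simp [h1]
    · rintro h1; injection h1 with h1; exact ⟨l, by simp [h1]⟩

theorem patchGo_spec (cs : List Char) (c : Char) :
    ∀ fuel k (r0 r1 : List String), k ≤ cs.length →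
      r0.length = cs.length → r1.length = cs.length →
      cs.length + 1 - k ≤ fuel →
      patchGo cs [c] fuel (PySem.Chars.findFrom cs [c] (k : Nat)) r0 r1
        = (patched cs c k r0 "(", patched cs c k r1 ")") := by
  intro fuel
  induction fuel with
  | zero => intro k r0 r1 hk _ _ hf; omega
  | succ fuel ih =>
    intro k r0 r1 hk h0 h1 hf
    by_cases hneg : PySem.Chars.findFrom cs [c] (k : Nat) = -1
    · -- no further match: nothing ≥ k satisfies cs[j] = c, patched is the identity
      have hnomem : ¬ ([c] <:+: cs.drop k) :=
        (PySem.Chars.findFrom_natCast_eq_neg_one_iff cs [c] k hk).mp hneg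
      have hno : ∀ j, k ≤ j → cs[j]? ≠ some c := by
        intro j hj habs
        apply hnomem
        have : [c] <+: cs.drop j := (singleton_prefix_drop cs c j).mpr habs
        rcases this with ⟨u, hu⟩
        have h2 : List.drop (j - k) (cs.drop k) = cs.drop j := by
          rw [List.drop_drop]; congr 1; omega
        have : cs.drop j <:+ cs.drop k := h2 ▸ List.drop_suffix _ _
        exact ((hu ▸ (List.prefix_append [c] u).isInfix).trans this.isInfix)
      have heq : ∀ (r : List String) (x : String), r.length = cs.length →
          patched cs c k r x = r := by
        intro r x _
        apply List.ext_getElem?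
        intro j
        rw [patched_getElem?]
        cases hv : r[j]? with
        | none => rfl
        | some v =>
          by_cases hkj : k ≤ j
          · simp [hno j hkj]
          · simp [hkj]
      simp [patchGo, hneg, heq r0 "(" h0, heq r1 ")" h1]
    · -- a match at i := findFrom …; patch it and continue from i+1
      obtain ⟨hki, hpre, hmin⟩ := PySem.Chars.findFrom_natCast_spec cs [c] k hk hneg
      set i := PySem.Chars.findFrom cs [c] (k : Nat) with hi
      have hi0 : 0 ≤ i := le_trans (by exact_mod_cast Nat.zero_le k) hki
      have hci : cs[i.toNat]? = some c := (singleton_prefix_drop cs c i.toNat).mp hpre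
      have hilt : i.toNat < cs.length := by
        by_contra habs
        rw [List.getElem?_eq_none (by omega : cs.length ≤ i.toNat)] at hci
        cases hci
      have hki' : k ≤ i.toNat := by
        have : (k : Int) ≤ i := hki
        omega
      have hcast : i + 1 = ((i.toNat + 1 : Nat) : Int) := by omega
      rw [patchGo, if_neg hneg, hcast,
        ih (i.toNat + 1) _ _ (by omega) (by simp [h0]) (by simp [h1]) (by omega)]
      have heq : ∀ (r : List String) (x : String), r.length = cs.length →
          patched cs c (i.toNat + 1) (r.set i.toNat x) x = patched cs c k r x := by
        intro r x hr
        apply List.ext_getElem?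
        intro j
        rw [patched_getElem?, patched_getElem?, List.getElem?_set]
        by_cases hij : i.toNat = j
        · subst hij
          rw [if_pos rfl, if_pos (by omega : i.toNat < r.length)]
          simp [hki', hci, List.getElem?_eq_getElem (show i.toNat < r.length by omega)]
        · rw [if_neg hij]
          cases hv : r[j]? with
          | none => rfl
          | some v =>
            simp only [Option.map_some, Option.some.injEq]
            rcases lt_trichotomy j i.toNat with h | h | h
            · have hne : ¬ (i.toNat + 1 ≤ j) := by omega
              by_cases hkj : k ≤ j
              · have hnc : cs[j]? ≠ some c := fun habs =>
                  hmin j hkj h ((singleton_prefix_drop cs c j).mpr habs)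
                simp [hne, hkj, hnc]
              · simp [hne, hkj]
            · exact absurd h.symm hij
            · simp [(by omega : i.toNat + 1 ≤ j), (by omega : k ≤ j)]
      rw [heq r0 "(" h0, heq r1 ")" h1]

theorem patched_zero_replicate (cs : List Char) (c : Char) (x y : String) :
    patched cs c 0 (List.replicate cs.length y) x
      = cs.map (fun d => if d = c then x else y) := by
  apply List.ext_getElem?
  intro j
  rw [patched_getElem?, List.getElem?_map]
  by_cases hj : j < cs.length
  · rw [List.getElem?_eq_getElem hj,
      List.getElem?_eq_getElem (by simpa using hj : j < (List.replicate cs.length y).length)]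
    simp
  · rw [List.getElem?_eq_none (by omega : cs.length ≤ j),
      List.getElem?_eq_none (by simpa using by omega)]
    rfl

theorem ofList_singleton_eq_iff (c d : Char) (t : String) (ht : t.toList = [d]) :
    String.ofList [c] = t ↔ c = d := by
  constructor
  · intro h
    have := congrArg String.toList h
    rw [String.toList_ofList, ht] at this
    exact List.singleton_inj.mp this
  · intro h
    subst h
    rw [← ht]
    exact String.ofList_toList

theorem ofList_singleton_ne (c : Char) (t : String) (ht : t.toList.length ≠ 1) :
    String.ofList [c] ≠ t := by
  intro h
  have := congrArg String.toList h
  rw [String.toList_ofList] at this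
  rw [← this] at ht
  simp at ht

-- ===== VERDICT =====
theorem transform_spec : Claim_equal_transform := by
  intro s t _
  unfold Spec_transform transform transform_alt
  simp only [transform_foldl, List.nil_append]
  by_cases h1 : t.toList.length = 1
  · obtain ⟨d, hd⟩ : ∃ d, t.toList = [d] := by
      match ht : t.toList, h1 with
      | [a], _ => exact ⟨a, rfl⟩
    rw [if_pos h1, hd]
    rw [show PySem.Chars.find s.toList [d]
          = PySem.Chars.findFrom s.toList [d] ((0 : Nat) : Int) by simp]
    rw [patchGo_spec s.toList d (s.toList.length + 1) 0 _ _ (Nat.zero_le _)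
      (by simp) (by simp) (by omega)]
    rw [patched_zero_replicate, patched_zero_replicate]
    have harr : ∀ (x y : String),
        s.toList.map (fun c => if String.ofList [c] = t then x else y)
          = s.toList.map (fun c => if c = d then x else y) := by
      intro x y
      apply List.map_congr_left
      intro c _
      by_cases hc : c = d
      · rw [if_pos ((ofList_singleton_eq_iff c d t hd).mpr hc), if_pos hc]
      · rw [if_neg (fun h => hc ((ofList_singleton_eq_iff c d t hd).mp h)), if_neg hc]
    rw [harr, harr]
  · rw [if_neg h1]
    simp [ofList_singleton_ne _ t h1, List.map_const']
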